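-- pv_equiv track=rewrite | github.com/Chromatic-Vision/theseus-bot | farm.py | get_farm_length_from_level
-- ===== SOURCE A (Python) =====
-- def get_farm_length_from_level(level: int) -> (int, int):
--
--     x = 2
--     y = 2
--     for i in range(1, level):
--         if i % 2 == 0:
--             y += 1
--         else:
--             x += 1
--     return x, y
-- ===== SOURCE B (Python) =====
-- def get_farm_length_from_level(level: int) -> (int, int):
--     if level <= 1:
--         return 2, 2
--     return 2 + level // 2, 2 + (level - 1) // 2
-- ===== Notes on version B (the rewrite author's own statement) =====
-- stated objective: faster
-- what changed: Replaces the loop counting odd/even indices in range(1, level) with a closed-form floor-division formula.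
import Mathlib
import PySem

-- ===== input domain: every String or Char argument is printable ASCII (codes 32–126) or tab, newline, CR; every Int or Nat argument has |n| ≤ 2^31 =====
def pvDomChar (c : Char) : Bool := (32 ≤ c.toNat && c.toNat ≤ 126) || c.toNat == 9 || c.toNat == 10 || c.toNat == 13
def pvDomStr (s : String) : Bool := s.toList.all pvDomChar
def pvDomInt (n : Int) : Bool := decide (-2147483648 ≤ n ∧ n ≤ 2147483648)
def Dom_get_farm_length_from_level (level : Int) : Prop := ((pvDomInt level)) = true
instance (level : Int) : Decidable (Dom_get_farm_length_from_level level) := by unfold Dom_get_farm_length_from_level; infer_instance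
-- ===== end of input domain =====

-- B replaces A's O(level) counting loop by a closed-form floor-division formula (O(1)).

-- ===== PORT A =====
def get_farm_length_from_level (level : Int) : Int × Int :=
  (PySem.List.pyRange 1 level 1).foldl
    (fun (s : Int × Int) i => if PySem.Int.mod i 2 = 0 then (s.1, s.2 + 1) else (s.1 + 1, s.2))
    (2, 2)

-- ===== PORT B =====
def get_farm_length_from_level_alt (level : Int) : Int × Int :=
  if level ≤ 1 then (2, 2)
  else (2 + PySem.Int.floordiv level 2, 2 + PySem.Int.floordiv (level - 1) 2)

-- ===== PRECONDITION & SPEC =====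
def Spec_get_farm_length_from_level (level : Int) (out : Int × Int) : Prop := out = get_farm_length_from_level_alt level
instance (level : Int) (out : Int × Int) : Decidable (Spec_get_farm_length_from_level level out) := by unfold Spec_get_farm_length_from_level; infer_instance

-- ===== CLAIM (what is proved, stated in full; the proofs are below) =====
def Claim_equal_get_farm_length_from_level : Prop := ∀ (level : Int), Dom_get_farm_length_from_level level → Spec_get_farm_length_from_level level (get_farm_length_from_level level)

-- ===== LEMMAS AND PROOFS =====

theorem farm_fold_closed (n : Nat) :
    (PySem.List.pyRange 1 (1 + (n : Int)) 1).foldl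
      (fun (s : Int × Int) i => if PySem.Int.mod i 2 = 0 then (s.1, s.2 + 1) else (s.1 + 1, s.2))
      (2, 2) = ((2 + ((n + 1) / 2 : Nat) : Int), (2 + ((n / 2 : Nat) : Int) : Int)) := by
  induction n with
  | zero => rw [show (1:Int) + (0:Nat) = 1 by norm_num, PySem.List.pyRange_one_eq_nil le_rfl]; rfl
  | succ k ih =>
      have h : (1 : Int) + (k + 1 : Nat) = (1 + (k : Int)) + 1 := by push_cast; ring
      rw [h, PySem.List.pyRange_one_succ_right (by omega), List.foldl_append, ih]
      simp only [List.foldl_cons, List.foldl_nil]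
      rcases Int.even_or_odd (1 + (k : Int)) with hk | hk
      · obtain ⟨m, hm⟩ := hk
        have : PySem.Int.mod (1 + (k : Int)) 2 = 0 := by
          rw [PySem.Int.mod_eq_emod_of_pos (by omega)]; omega
        rw [this]
        simp only [reduceIte, Prod.mk.injEq]
        refine ⟨by omega, by omega⟩
      · obtain ⟨m, hm⟩ := hk
        have : PySem.Int.mod (1 + (k : Int)) 2 = 1 := by
          rw [PySem.Int.mod_eq_emod_of_pos (by omega)]; omega
        rw [this]
        simp only [if_neg (by omega : (1:Int) ≠ 0), Prod.mk.injEq]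
        refine ⟨by omega, by omega⟩

-- ===== VERDICT (by name: the statement is the Claim_ definition above) =====
theorem get_farm_length_from_level_spec : Claim_equal_get_farm_length_from_level := by
  intro level _
  unfold Spec_get_farm_length_from_level get_farm_length_from_level get_farm_length_from_level_alt
  by_cases h : level ≤ 1
  · rw [if_pos h, PySem.List.pyRange_one_eq_nil h]; rfl
  · rw [if_neg h]
    obtain ⟨n, hn⟩ : ∃ n : Nat, level = 1 + (n : Int) := ⟨(level - 1).toNat, by omega⟩
    subst hn
    rw [farm_fold_closed]
    rw [PySem.Int.floordiv_eq_ediv_of_pos (by omega),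
        PySem.Int.floordiv_eq_ediv_of_pos (by omega)]
    simp only [Prod.mk.injEq]
    refine ⟨by omega, by omega⟩
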